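-- pv_equiv track=rewrite | github.com/Digital-Twins-RSBR/middleware-dt | orchestrator/management/commands/generate_digitaltwins_from_devices.py | model_path_bfs
-- ===== SOURCE A (Python) =====
-- def model_path_bfs(start_dtdl_id: str, target_dtdl_id: str, adjacency: dict, model_by_id: dict):
--     """Find a model dtdl_id path from start to target using BFS. Returns list of dtdl_ids or empty if none."""
--     from collections import deque
--     q = deque()
--     q.append((start_dtdl_id, [start_dtdl_id]))
--     visited = set([start_dtdl_id])
--     while q:
--         cur, path = q.popleft()
--         if cur == target_dtdl_id or (target_dtdl_id in cur):
--             return path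
--         for (tgt, rel) in adjacency.get(cur, []):
--             # resolve tgt into an actual key in model_by_id (substring match)
--             for mid in model_by_id.keys():
--                 if tgt in mid and mid not in visited:
--                     visited.add(mid)
--                     q.append((mid, path + [mid]))
--     return []
-- ===== SOURCE B (Python) =====
-- def model_path_bfs(start_dtdl_id: str, target_dtdl_id: str, adjacency: dict, model_by_id: dict):
--     """BFS over parent pointers with a memoized substring-resolution index:
--     each edge target's matching model ids are computed once and cached, the
--     queue carries node ids only, `parent`'s key set doubles as the visited set,
--     and the path is rebuilt from the parent map only on success."""
--     from collections import deque
--     mids = list(model_by_id.keys())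
--     resolve = {}                      # tgt -> list of mids with tgt as substring (memoized)
--     parent = {start_dtdl_id: None}
--     q = deque([start_dtdl_id])
--     while q:
--         cur = q.popleft()
--         if cur == target_dtdl_id or target_dtdl_id in cur:
--             path = []
--             while cur is not None:
--                 path.append(cur)
--                 cur = parent[cur]
--             path.reverse()
--             return path
--         for tgt, _rel in adjacency.get(cur, []):
--             if tgt not in resolve:
--                 resolve[tgt] = [mid for mid in mids if tgt in mid]
--             for mid in resolve[tgt]:
--                 if mid not in parent:
--                     parent[mid] = cur
--                     q.append(mid)
--     return []
-- ===== Notes on version B (the rewrite author's own statement) =====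
-- stated objective: alternative
-- what changed: Replaces the path-carrying queue and visited set by a queue of plain node ids with a parent-pointer dict (whose key set serves as visited, and from which the path is rebuilt only on success), and replaces the per-edge inner scan over all model ids by a memoized resolution index computed once per distinct edge target.
import Mathlib
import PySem

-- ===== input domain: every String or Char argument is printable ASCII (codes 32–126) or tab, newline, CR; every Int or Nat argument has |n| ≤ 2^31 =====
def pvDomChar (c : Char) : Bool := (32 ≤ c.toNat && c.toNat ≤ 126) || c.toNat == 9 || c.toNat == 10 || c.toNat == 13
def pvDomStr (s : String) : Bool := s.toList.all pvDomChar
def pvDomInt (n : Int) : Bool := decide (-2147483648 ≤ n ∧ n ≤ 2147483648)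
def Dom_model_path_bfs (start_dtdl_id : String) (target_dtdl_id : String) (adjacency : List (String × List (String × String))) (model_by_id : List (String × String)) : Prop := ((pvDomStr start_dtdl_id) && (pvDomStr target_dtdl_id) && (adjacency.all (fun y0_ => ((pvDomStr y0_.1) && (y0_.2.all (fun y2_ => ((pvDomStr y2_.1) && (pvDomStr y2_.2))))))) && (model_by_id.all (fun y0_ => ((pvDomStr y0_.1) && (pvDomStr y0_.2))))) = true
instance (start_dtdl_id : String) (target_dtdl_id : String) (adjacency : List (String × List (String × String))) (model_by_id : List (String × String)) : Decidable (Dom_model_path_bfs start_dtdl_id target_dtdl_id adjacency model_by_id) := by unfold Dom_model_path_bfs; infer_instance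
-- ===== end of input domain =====

-- B drops A's path-carrying queue and visited set: the queue holds node ids only, a
-- parent-pointer dict (whose key set is the visited set) rebuilds the path on success,
-- and a memoized resolution index caches each edge target's substring matches.

-- ===== PORT A =====
-- the inner 'for mid in model_by_id.keys(): …' loop of A, updating (queue, visited)
def pvStepA (path : List String) (mids : List String)
    (st : List (String × List String) × PySem.Set String) (edge : String × String) :
    List (String × List String) × PySem.Set String :=
  mids.foldl (fun st2 mid =>
    if PySem.Str.isIn edge.1 mid && !(PySem.Set.contains st2.2 mid) then
      (st2.1 ++ [(mid, path ++ [mid])], PySem.Set.add st2.2 mid)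
    else st2) st

-- the 'while q:' loop of A; fuel bounds the number of dequeues (each node is enqueued at most
-- once thanks to 'visited', so model_by_id.length + 2 dequeues always exhaust the queue)
def pvLoopA (target : String) (adj : PySem.Dict String (List (String × String)))
    (mids : List String) : Nat → List (String × List String) → PySem.Set String → List String
  | 0, _, _ => []
  | fuel+1, q, visited =>
    match q with
    | [] => []
    | (cur, path) :: qrest =>
      if cur == target || PySem.Str.isIn target cur then path
      else
        let st := (adj.getD cur []).foldl (pvStepA path mids) (qrest, visited)
        pvLoopA target adj mids fuel st.1 st.2

def model_path_bfs (start_dtdl_id : String) (target_dtdl_id : String) (adjacency : List (String × List (String × String))) (model_by_id : List (String × String)) : List String :=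
  pvLoopA target_dtdl_id (PySem.Dict.ofList adjacency) (PySem.Dict.ofList model_by_id).keys
    (model_by_id.length + 2) [(start_dtdl_id, [start_dtdl_id])]
    (PySem.Set.ofList [start_dtdl_id])

-- ===== PORT B =====
-- one edge of B's 'for tgt, _rel in adjacency.get(cur, []):' body: memoize the target's
-- substring matches in 'resolve', then enqueue the unvisited matches with parent pointers;
-- state is (queue, parent, resolve)
def pvStepB (cur : String) (mids : List String)
    (st : List String × PySem.Dict String (Option String) × PySem.Dict String (List String))
    (edge : String × String) :
    List String × PySem.Dict String (Option String) × PySem.Dict String (List String) :=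
  let r := if st.2.2.contains edge.1 then st.2.2
           else st.2.2.insert edge.1 (mids.filter (fun mid => PySem.Str.isIn edge.1 mid))
  let s := (r.getD edge.1 []).foldl
    (fun s2 mid => if s2.2.contains mid then s2
                   else (s2.1 ++ [mid], s2.2.insert mid (some cur))) (st.1, st.2.1)
  (s.1, s.2, r)

-- B's 'while cur is not None:' reconstruction loop; fuel parent.size + 1 always suffices
-- (the parent chain visits distinct keys); the 'none' lookup branch is unreachable because
-- every queued node is a key of parent (Python would raise KeyError there)
def pvRebuild (parent : PySem.Dict String (Option String)) :
    Nat → Option String → List String → List String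
  | 0, _, acc => acc
  | fuel+1, node?, acc =>
    match node? with
    | none => acc
    | some node =>
      match parent.get? node with
      | some nxt => pvRebuild parent fuel nxt (acc ++ [node])
      | none => acc ++ [node]

-- the 'while q:' loop of B (same fuel discipline as A's port)
def pvLoopB (target : String) (adj : PySem.Dict String (List (String × String)))
    (mids : List String) : Nat → List String → PySem.Dict String (Option String) →
      PySem.Dict String (List String) → List String
  | 0, _, _, _ => []
  | fuel+1, q, parent, resolve =>
    match q with
    | [] => []
    | cur :: qrest =>
      if cur == target || PySem.Str.isIn target cur then
        (pvRebuild parent (parent.size + 1) (some cur) []).reverse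
      else
        let st := (adj.getD cur []).foldl (pvStepB cur mids) (qrest, parent, resolve)
        pvLoopB target adj mids fuel st.1 st.2.1 st.2.2

def model_path_bfs_alt (start_dtdl_id : String) (target_dtdl_id : String) (adjacency : List (String × List (String × String))) (model_by_id : List (String × String)) : List String :=
  pvLoopB target_dtdl_id (PySem.Dict.ofList adjacency) (PySem.Dict.ofList model_by_id).keys
    (model_by_id.length + 2) [start_dtdl_id]
    ((PySem.Dict.empty).insert start_dtdl_id none)
    PySem.Dict.empty

-- ===== PRECONDITION & SPEC =====
def Spec_model_path_bfs (start_dtdl_id : String) (target_dtdl_id : String) (adjacency : List (String × List (String × String))) (model_by_id : List (String × String)) (out : List String) : Prop := out = model_path_bfs_alt start_dtdl_id target_dtdl_id adjacency model_by_id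
instance (start_dtdl_id : String) (target_dtdl_id : String) (adjacency : List (String × List (String × String))) (model_by_id : List (String × String)) (out : List String) : Decidable (Spec_model_path_bfs start_dtdl_id target_dtdl_id adjacency model_by_id out) := by unfold Spec_model_path_bfs; infer_instance

-- ===== CLAIM (what is proved, stated in full; the proofs are below) =====
def Claim_equal_model_path_bfs : Prop := ∀ (start_dtdl_id : String) (target_dtdl_id : String) (adjacency : List (String × List (String × String))) (model_by_id : List (String × String)), Dom_model_path_bfs start_dtdl_id target_dtdl_id adjacency model_by_id → Spec_model_path_bfs start_dtdl_id target_dtdl_id adjacency model_by_id (model_path_bfs start_dtdl_id target_dtdl_id adjacency model_by_id)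

-- ===== LEMMAS AND PROOFS =====

-- 'pvChain parent n p': following parent pointers from n yields exactly the path p (ending in n)
inductive pvChain (parent : PySem.Dict String (Option String)) : String → List String → Prop
  | base {n : String} : parent.get? n = some none → pvChain parent n [n]
  | step {n m : String} {p : List String} :
      parent.get? n = some (some m) → pvChain parent m p → pvChain parent n (p ++ [n])

-- relation between one entry of A's queue and one entry of B's queue
def pvEntryRel (parent : PySem.Dict String (Option String))
    (e : String × List String) (n : String) : Prop :=
  e.1 = n ∧ pvChain parent n e.2 ∧ e.2.length ≤ parent.size

-- every value stored in B's resolve dict is the substring filter of its key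
def pvIres (mids : List String) (resolve : PySem.Dict String (List String)) : Prop :=
  ∀ k v, resolve.get? k = some v → v = mids.filter (fun mid => PySem.Str.isIn k mid)

-- invariant between A's state (queue, visited) and B's (queue, parent) inside one dequeue step
def pvFInv (cur : String) (path : List String)
    (stA : List (String × List String) × PySem.Set String)
    (qB : List String) (parent : PySem.Dict String (Option String)) : Prop :=
  (∀ x, parent.contains x = PySem.Set.contains stA.2 x) ∧
  List.Forall₂ (pvEntryRel parent) stA.1 qB ∧
  pvChain parent cur path ∧ path.length ≤ parent.size

theorem pvChain_insert_fresh {parent : PySem.Dict String (Option String)} {k : String}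
    {v : Option String} {n : String} {p : List String}
    (hk : parent.contains k = false) (h : pvChain parent n p) :
    pvChain (parent.insert k v) n p := by
  induction h with
  | base hn =>
      refine pvChain.base ?_
      rw [PySem.Dict.get?_insert_of_ne]
      · exact hn
      · intro hnk; subst hnk
        rw [PySem.Dict.contains_eq_isSome_get?, hn] at hk; simp at hk
  | step hn _ ih =>
      refine pvChain.step ?_ ih
      rw [PySem.Dict.get?_insert_of_ne]
      · exact hn
      · intro hnk; subst hnk
        rw [PySem.Dict.contains_eq_isSome_get?, hn] at hk; simp at hk

theorem pvEntryRel_insert_fresh {parent : PySem.Dict String (Option String)} {k : String}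
    {v : Option String} {e : String × List String} {n : String}
    (hk : parent.contains k = false) (h : pvEntryRel parent e n) :
    pvEntryRel (parent.insert k v) e n := by
  obtain ⟨h1, h2, h3⟩ := h
  refine ⟨h1, pvChain_insert_fresh hk h2, ?_⟩
  have := PySem.Dict.size_insert parent k v
  rw [hk] at this
  simp at this
  omega

theorem pvRebuild_chain {parent : PySem.Dict String (Option String)} {n : String}
    {p : List String} (h : pvChain parent n p) :
    ∀ (fuel : Nat) (acc : List String), p.length + 1 ≤ fuel →
      pvRebuild parent fuel (some n) acc = acc ++ p.reverse := by
  induction h with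
  | @base n hn =>
      intro fuel acc hf
      cases fuel with
      | zero => simp at hf
      | succ f =>
        simp only [pvRebuild, hn]
        cases f with
        | zero => simp at hf
        | succ f' => simp [pvRebuild]
  | @step n m p hn _ ih =>
      intro fuel acc hf
      cases fuel with
      | zero => simp at hf
      | succ f =>
        simp only [pvRebuild, hn]
        rw [ih f (acc ++ [n]) (by simp at hf; omega)]
        simp

theorem pvBool_eq_of_iff {a b : Bool} (h : a = true ↔ b = true) : a = b := by
  cases a <;> cases b <;> simp_all

-- discovering one fresh node preserves the invariant
theorem pvDiscover_inv (cur : String) (path : List String) (m : String)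
    (qA : List (String × List String)) (vis : PySem.Set String)
    (qB : List String) (parent : PySem.Dict String (Option String))
    (h : pvFInv cur path (qA, vis) qB parent)
    (hm : parent.contains m = false) :
    pvFInv cur path (qA ++ [(m, path ++ [m])], PySem.Set.add vis m)
      (qB ++ [m]) (parent.insert m (some cur)) := by
  obtain ⟨hkv, hq, hch, hsz⟩ := h
  have hsize : (parent.insert m (some cur)).size = parent.size + 1 := by
    have := PySem.Dict.size_insert parent m (some cur)
    rw [hm] at this; simpa using this
  refine ⟨?_, ?_, pvChain_insert_fresh hm hch, by omega⟩
  · intro x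
    apply pvBool_eq_of_iff
    rw [PySem.Dict.contains_insert]
    constructor
    · intro hx
      rcases Bool.or_eq_true_iff.mp hx with hx | hx
      · have : x = m := by simpa using hx
        subst this
        simp [PySem.Set.mem_add]
      · rw [hkv] at hx
        simp [PySem.Set.mem_add] at hx ⊢
        exact Or.inl (by simpa [PySem.Set.contains_iff] using hx)
    · intro hx
      simp [PySem.Set.mem_add] at hx
      rcases hx with hx | hx
      · rw [Bool.or_eq_true_iff]; right
        rw [hkv]; simpa [PySem.Set.contains_iff] using hx
      · subst hx; simp
  · refine List.rel_append (hq.imp (fun a b h => pvEntryRel_insert_fresh hm h)) ?_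
    refine List.Forall₂.cons ⟨rfl, ?_, ?_⟩ List.Forall₂.nil
    · exact pvChain.step (PySem.Dict.get?_insert_self parent m (some cur))
        (pvChain_insert_fresh hm hch)
    · simp [hsize]; omega

-- A's inner-loop body and B's inner-loop body as named functions (definitionally the
-- lambdas appearing in pvStepA / pvStepB; used only by the proofs)
def pvAF (tgt : String) (path : List String)
    (st2 : List (String × List String) × PySem.Set String) (mid : String) :
    List (String × List String) × PySem.Set String :=
  if PySem.Str.isIn tgt mid && !(PySem.Set.contains st2.2 mid) then
    (st2.1 ++ [(mid, path ++ [mid])], PySem.Set.add st2.2 mid)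
  else st2

def pvBF (cur : String) (s2 : List String × PySem.Dict String (Option String)) (mid : String) :
    List String × PySem.Dict String (Option String) :=
  if s2.2.contains mid then s2 else (s2.1 ++ [mid], s2.2.insert mid (some cur))

theorem pvAF_skip {tgt : String} {path : List String}
    {qA : List (String × List String)} {vis : PySem.Set String} {m : String}
    (hc : (PySem.Str.isIn tgt m && !(PySem.Set.contains vis m)) = false) :
    pvAF tgt path (qA, vis) m = (qA, vis) := by
  unfold pvAF; rw [hc]; simp

theorem pvAF_take {tgt : String} {path : List String}
    {qA : List (String × List String)} {vis : PySem.Set String} {m : String}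
    (hc : (PySem.Str.isIn tgt m && !(PySem.Set.contains vis m)) = true) :
    pvAF tgt path (qA, vis) m = (qA ++ [(m, path ++ [m])], PySem.Set.add vis m) := by
  unfold pvAF; rw [hc]; simp

theorem pvBF_skip {cur : String} {qB : List String}
    {parent : PySem.Dict String (Option String)} {m : String}
    (hc : parent.contains m = true) :
    pvBF cur (qB, parent) m = (qB, parent) := by
  unfold pvBF; rw [hc]; simp

theorem pvBF_take {cur : String} {qB : List String}
    {parent : PySem.Dict String (Option String)} {m : String}
    (hc : parent.contains m = false) :
    pvBF cur (qB, parent) m = (qB ++ [m], parent.insert m (some cur)) := by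
  unfold pvBF; rw [hc]; simp

-- A's scan over all mids with the substring test equals B's fold over the pre-filtered list
theorem pvMids_eq (cur : String) (path : List String) (tgt : String) :
    ∀ (ms : List String) (qA : List (String × List String)) (vis : PySem.Set String)
      (qB : List String) (parent : PySem.Dict String (Option String)),
      pvFInv cur path (qA, vis) qB parent →
      pvFInv cur path
        (ms.foldl (pvAF tgt path) (qA, vis))
        ((ms.filter (fun mid => PySem.Str.isIn tgt mid)).foldl (pvBF cur) (qB, parent)).1
        ((ms.filter (fun mid => PySem.Str.isIn tgt mid)).foldl (pvBF cur) (qB, parent)).2 := by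
  intro ms
  induction ms with
  | nil => intro qA vis qB parent h; exact h
  | cons m rest ih =>
      intro qA vis qB parent h
      rw [List.foldl_cons]
      cases hm : PySem.Str.isIn tgt m with
      | true =>
          rw [List.filter_cons_of_pos (by simpa using hm), List.foldl_cons]
          cases hv : PySem.Set.contains vis m with
          | true =>
              have hp : parent.contains m = true := by rw [h.1, hv]
              rw [pvAF_skip (by rw [hv]; simp), pvBF_skip hp]
              exact ih qA vis qB parent h
          | false =>
              have hp : parent.contains m = false := by rw [h.1, hv]
              rw [pvAF_take (by rw [hm, hv]; simp), pvBF_take hp]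
              exact ih _ _ _ _ (pvDiscover_inv cur path m qA vis qB parent h hp)
      | false =>
          rw [List.filter_cons_of_neg (by simp only [hm]; exact Bool.false_ne_true),
            pvAF_skip (by rw [hm]; simp)]
          exact ih qA vis qB parent h

-- one edge step: A's pvStepA and B's pvStepB stay related, and resolve stays well-formed
theorem pvEdge_eq (cur : String) (path : List String) (mids : List String)
    (e : String × String)
    (stA : List (String × List String) × PySem.Set String)
    (qB : List String) (parent : PySem.Dict String (Option String))
    (resolve : PySem.Dict String (List String))
    (h : pvFInv cur path stA qB parent) (hr : pvIres mids resolve) :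
    pvFInv cur path (pvStepA path mids stA e)
      (pvStepB cur mids (qB, parent, resolve) e).1
      (pvStepB cur mids (qB, parent, resolve) e).2.1 ∧
    pvIres mids (pvStepB cur mids (qB, parent, resolve) e).2.2 := by
  unfold pvStepA pvStepB
  simp only []
  set flt := mids.filter (fun mid => PySem.Str.isIn e.1 mid) with hflt
  obtain ⟨qA, vis⟩ := stA
  have hmain : ∀ (r : PySem.Dict String (List String)), r.getD e.1 [] = flt → pvIres mids r →
      pvFInv cur path (mids.foldl (pvAF e.1 path) (qA, vis))
        ((r.getD e.1 []).foldl (pvBF cur) (qB, parent)).1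
        ((r.getD e.1 []).foldl (pvBF cur) (qB, parent)).2 ∧
      pvIres mids r := by
    intro r hget hires
    refine ⟨?_, hires⟩
    rw [hget, hflt]
    exact pvMids_eq cur path e.1 mids qA vis qB parent h
  by_cases hc : resolve.contains e.1 = true
  · rw [if_pos hc]
    obtain ⟨v, hv⟩ : ∃ v, resolve.get? e.1 = some v := by
      rw [PySem.Dict.contains_eq_isSome_get?] at hc
      exact Option.isSome_iff_exists.mp hc
    exact hmain resolve
      (by rw [PySem.Dict.getD_of_get?_eq_some resolve [] hv, hr _ _ hv]) hr
  · rw [if_neg hc]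
    refine hmain _ ?_ ?_
    · rw [PySem.Dict.getD_of_get?_eq_some _ []
        (PySem.Dict.get?_insert_self resolve e.1 flt)]
    · intro k v hk
      by_cases hke : k = e.1
      · subst hke
        rw [PySem.Dict.get?_insert_self] at hk
        simpa [hflt] using hk.symm
      · rw [PySem.Dict.get?_insert_of_ne resolve flt hke] at hk
        exact hr k v hk

-- the fold over all edges of the dequeued node preserves the relation
theorem pvEdges_eq (cur : String) (path : List String) (mids : List String) :
    ∀ (edges : List (String × String)) stA qB parent resolve,
      pvFInv cur path stA qB parent → pvIres mids resolve →
      pvFInv cur path (edges.foldl (pvStepA path mids) stA)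
        (edges.foldl (pvStepB cur mids) (qB, parent, resolve)).1
        (edges.foldl (pvStepB cur mids) (qB, parent, resolve)).2.1 ∧
      pvIres mids (edges.foldl (pvStepB cur mids) (qB, parent, resolve)).2.2 := by
  intro edges
  induction edges with
  | nil => intro stA qB parent resolve h hr; exact ⟨h, hr⟩
  | cons e es ih =>
      intro stA qB parent resolve h hr
      simp only [List.foldl_cons]
      obtain ⟨h', hr'⟩ := pvEdge_eq cur path mids e stA qB parent resolve h hr
      have := ih (pvStepA path mids stA e)
        (pvStepB cur mids (qB, parent, resolve) e).1
        (pvStepB cur mids (qB, parent, resolve) e).2.1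
        (pvStepB cur mids (qB, parent, resolve) e).2.2 h' hr'
      simpa using this

-- main loop equivalence
theorem pvLoop_eq (target : String) (adj : PySem.Dict String (List (String × String)))
    (mids : List String) :
    ∀ (fuel : Nat) (qA : List (String × List String)) (qB : List String)
      (vis : PySem.Set String) (parent : PySem.Dict String (Option String))
      (resolve : PySem.Dict String (List String)),
      List.Forall₂ (pvEntryRel parent) qA qB →
      (∀ x, parent.contains x = PySem.Set.contains vis x) →
      pvIres mids resolve →
      pvLoopA target adj mids fuel qA vis = pvLoopB target adj mids fuel qB parent resolve := by
  intro fuel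
  induction fuel with
  | zero => intro qA qB vis parent resolve _ _ _; rfl
  | succ f ih =>
      intro qA qB vis parent resolve hq hkv hr
      cases hq with
      | nil => rfl
      | @cons e n qA' qB' he hrest =>
          obtain ⟨he1, hch, hsz⟩ := he
          obtain ⟨cur, path⟩ := e
          cases he1
          simp only [pvLoopA, pvLoopB]
          by_cases hg : (cur == target || PySem.Str.isIn target cur) = true
          · rw [if_pos hg, if_pos hg]
            rw [pvRebuild_chain hch (parent.size + 1) [] (by omega)]
            simp
          · rw [if_neg hg, if_neg hg]
            obtain ⟨⟨hkv2, hq2, _, _⟩, hr2⟩ := pvEdges_eq cur path mids (adj.getD cur [])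
              (qA', vis) qB' parent resolve ⟨hkv, hrest, hch, hsz⟩ hr
            exact ih _ _ _ _ _ hq2 hkv2 hr2

-- ===== VERDICT (by name: the statement is the Claim_ definition above) =====
theorem model_path_bfs_spec : Claim_equal_model_path_bfs := by
  intro s t adjacency model_by_id _
  unfold Spec_model_path_bfs model_path_bfs model_path_bfs_alt
  apply pvLoop_eq
  · refine List.Forall₂.cons ⟨rfl, ?_, ?_⟩ List.Forall₂.nil
    · exact pvChain.base (PySem.Dict.get?_insert_self PySem.Dict.empty s none)
    · simp [PySem.Dict.size_insert, PySem.Dict.contains_empty, PySem.Dict.size_empty]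
  · intro x
    apply pvBool_eq_of_iff
    rw [PySem.Dict.contains_insert]
    simp [PySem.Set.ofList, PySem.Set.add, PySem.Dict.contains_empty]
  · intro k v hk
    rw [PySem.Dict.get?_empty] at hk
    simp at hk
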